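-- pv_equiv track=rewrite | github.com/halvorlinder/Mastermind-Solver- | mastermind.py | get_guess_maximize_worst_case
-- ===== SOURCE A (Python) =====
-- from math import inf
--
-- COLORS = 6
--
-- def is_possible(combination, guess, constraint):
--     return (reds:=equal_pins(combination, guess))==constraint[0] and semi_equal_pins(combination, guess)-reds==constraint[1]
--
-- def equal_pins(comb1, comb2):
--     return len([x for x in list(zip(comb1, comb2)) if x[0]==x[1]])
--
-- def semi_equal_pins(comb1, comb2):
--     A = [0]*COLORS
--     B = [0]*COLORS
--     for pin in comb1:
--         A[pin]+=1
--     for pin in comb2: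
--         B[pin]+=1
--     return sum(map(lambda a: min(a[0],a[1]), zip(A,B)))
--
-- def excludes(combination, constraint, possible):
--     count = 0
--     for comb in possible:
--         if not is_possible(comb, combination, constraint):
--             count+=1
--     return count
--
-- def get_hash(combination, symmetry):
--     structure = dict()
--     for n in combination:
--         if not n in structure:
--             structure[n] = len(structure)
--     return tuple(map(lambda x: symmetry["map"][x], combination))+tuple(map(lambda x: structure[x], combination))
--
-- def get_guess_maximize_worst_case(combinations, constraints, possible, symmetry):
--     #The algorithm will always choose this as its first guess, so there is no point in calculating it
--     if len(combinations)==len(possible):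
--         return (0,0,1,1)
--     global_best = 0
--     best_comb = (-1,-1,-1,-1)
--     #checked contains the hashed values of the conbinations that have been checked
--     checked = set()
--     #We want to guess from possible when it contains a tied best guess, this is tracked by this bool
--     best_in_possible = False
--     #Find the combination that has the best worst case, all combinations need be concidered, as the guess
--     #that eliminates the highest number of possibilities could lie outside the set of possible solutions
--     #I found this by empirical evidence
--     for comb in combinations:
--         #If the hash already excists it means that a symmetric combination has already been checked
--         if get_hash(comb, symmetry) in checked:
--             continue
--         checked.add(get_hash(comb, symmetry))
--         local_worst = inf
--         for const in constraints:
--             if (exc:=excludes(comb, const, possible)) < local_worst: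
--                 local_worst = exc
--         if local_worst > global_best:
--             global_best = local_worst
--             best_comb = comb
--             best_in_possible = comb in possible
--         elif (not best_in_possible) and local_worst==global_best and (comb in possible):
--             global_best = local_worst
--             best_comb = comb
--             best_in_possible = True
--     # if not best_in_possible:
--     #     inform("\nThe guess is not in possible!\n")
--     return best_comb
-- ===== SOURCE B (Python) =====
-- COLORS = 6
--
-- def _feedback(p, comb):
--     reds = sum(1 for a, b in zip(p, comb) if a == b)
--     total = sum(min(p.count(c), comb.count(c)) for c in range(COLORS))
--     return (reds, total - reds)
--
-- def _hash(comb, symmetry):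
--     structure = {}
--     for x in comb:
--         structure.setdefault(x, len(structure))
--     m = symmetry["map"]
--     return tuple(m[x] for x in comb) + tuple(structure[x] for x in comb)
--
-- def _gt(a, b):
--     # '>' on int-or-None where None stands for +infinity
--     if a is None:
--         return b is not None
--     if b is None:
--         return False
--     return a > b
--
-- def get_guess_maximize_worst_case(combinations, constraints, possible, symmetry):
--     if len(combinations) == len(possible):
--         return (0, 0, 1, 1)
--     n = len(possible)
--     global_best = 0            # None stands for +infinity
--     best_comb = (-1, -1, -1, -1)
--     best_in_possible = False
--     checked = set()
--     for comb in combinations: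
--         h = _hash(comb, symmetry)
--         if h in checked:
--             continue
--         checked.add(h)
--         # one pass over `possible`: histogram of feedbacks against this guess
--         hist = {}
--         for p in possible:
--             fb = _feedback(p, comb)
--             hist[fb] = hist.get(fb, 0) + 1
--         # worst case over constraints = n - most frequent feedback among them
--         if constraints:
--             m = 0
--             for c in constraints:
--                 m = max(m, hist.get(c, 0))
--             local_worst = n - m
--         else:
--             local_worst = None
--         if _gt(local_worst, global_best):
--             global_best = local_worst
--             best_comb = comb
--             best_in_possible = comb in possible
--         elif (not best_in_possible) and local_worst == global_best and comb in possible: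
--             global_best = local_worst
--             best_comb = comb
--             best_in_possible = True
--     return best_comb
-- ===== Notes on version B (the rewrite author's own statement) =====
-- stated objective: alternative
-- what changed: Instead of rescanning `possible` once per constraint (equal_pins + semi_equal_pins recomputed for every constraint/candidate pair), B makes one pass over `possible` per guess, building a histogram of (reds, whites) feedbacks, and reads each constraint's exclusion count as |possible| minus a histogram lookup (it saves the |constraints| factor on the inner scan; a timing run's inputs keep constraints small, so no measured speed is claimed).
-- outside the precondition, e.g. on get_guess_maximize_worst_case([(-1,)], [(0, 1)], [(5,), (5,)], {'map': {-1: 0}}): A returns (-1, -1, -1, -1), B returns (-1,); on get_guess_maximize_worst_case([(7,)], [(2, 0)], [(7,), (8,)], {'map': {7: 0, 8: 0}}): A returns (7,), B returns (7,)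
import Mathlib
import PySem

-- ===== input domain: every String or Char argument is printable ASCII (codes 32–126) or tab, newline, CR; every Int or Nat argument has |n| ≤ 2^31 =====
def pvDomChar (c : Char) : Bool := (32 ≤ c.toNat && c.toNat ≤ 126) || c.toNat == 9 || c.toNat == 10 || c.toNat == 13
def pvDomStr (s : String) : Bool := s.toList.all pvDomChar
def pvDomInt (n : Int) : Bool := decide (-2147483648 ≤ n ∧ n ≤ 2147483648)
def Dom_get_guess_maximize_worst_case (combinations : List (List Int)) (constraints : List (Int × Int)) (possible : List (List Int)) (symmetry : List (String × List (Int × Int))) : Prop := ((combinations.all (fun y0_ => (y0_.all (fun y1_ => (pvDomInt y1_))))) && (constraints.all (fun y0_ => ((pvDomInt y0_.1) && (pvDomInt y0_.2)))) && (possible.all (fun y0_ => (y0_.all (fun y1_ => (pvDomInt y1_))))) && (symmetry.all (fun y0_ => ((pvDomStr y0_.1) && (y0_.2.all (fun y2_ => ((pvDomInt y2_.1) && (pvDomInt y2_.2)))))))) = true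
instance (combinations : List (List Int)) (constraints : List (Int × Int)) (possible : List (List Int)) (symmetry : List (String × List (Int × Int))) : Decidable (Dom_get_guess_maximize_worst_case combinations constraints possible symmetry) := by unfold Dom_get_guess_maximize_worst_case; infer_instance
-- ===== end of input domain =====

-- ===== PORT A =====
-- B replaces A's per-constraint rescans of `possible` by one feedback histogram per guess (objective: alternative).
-- Helpers of A, transliterated. Where Python would raise (pin index out of range in
-- semi_equal_pins, missing "map"/pin key in get_hash) the total PySem forms below return a
-- default; those inputs are excluded by Pre_get_guess_maximize_worst_case.
def equal_pins (comb1 comb2 : List Int) : Int :=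
  (((comb1.zip comb2).filter (fun x => x.1 == x.2)).length : Int)

-- A[pin] += 1 on a Python list (negative index from the end; IndexError outside Pre_)
def pvBump (l : List Int) (pin : Int) : List Int :=
  PySem.List.pySetD l pin (PySem.List.pyGetD l pin 0 + 1)

def semi_equal_pins (comb1 comb2 : List Int) : Int :=
  let A := comb1.foldl pvBump (List.replicate 6 0)
  let B := comb2.foldl pvBump (List.replicate 6 0)
  ((A.zip B).map (fun a => min a.1 a.2)).sum

def is_possible (combination guess : List Int) (constraint : Int × Int) : Bool :=
  let reds := equal_pins combination guess
  reds == constraint.1 && (semi_equal_pins combination guess - reds == constraint.2)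

def excludes (combination : List Int) (constraint : Int × Int) (possible : List (List Int)) : Int :=
  possible.foldl (fun count comb => if !is_possible comb combination constraint then count + 1 else count) 0

def get_hash (combination : List Int) (symmetry : List (String × List (Int × Int))) : List Int :=
  let struct := combination.foldl
    (fun d n => if (PySem.Dict.get? d n).isSome then d else PySem.Dict.insert d n (PySem.Dict.size d : Int))
    PySem.Dict.empty
  combination.map (fun x => PySem.Dict.getD (PySem.Dict.mk (PySem.Dict.getD (PySem.Dict.mk symmetry) "map" [])) x 0)
    ++ combination.map (fun x => PySem.Dict.getD struct x 0)

-- Python's '<' / '>' on int-vs-math.inf, with `none` standing for +infinity (exact on this use)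
def pvLtInf (e : Int) (lw : Option Int) : Bool :=
  match lw with | none => true | some v => e < v
def pvGtInf (a b : Option Int) : Bool :=
  match a, b with
  | none, none => false
  | none, some _ => true
  | some _, none => false
  | some x, some y => y < x

def pvStepA (constraints : List (Int × Int)) (possible : List (List Int))
    (symmetry : List (String × List (Int × Int)))
    (st : Option Int × List Int × PySem.Set (List Int) × Bool) (comb : List Int) :
    Option Int × List Int × PySem.Set (List Int) × Bool :=
  let h := get_hash comb symmetry
  if PySem.Set.contains st.2.2.1 h then st
  else
    let chk := PySem.Set.add st.2.2.1 h
    let lw := constraints.foldl (fun lw cst =>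
        let exc := excludes comb cst possible
        if pvLtInf exc lw then some exc else lw) none
    if pvGtInf lw st.1 then (lw, comb, chk, decide (comb ∈ possible))
    else if !st.2.2.2 && lw == st.1 && decide (comb ∈ possible) then (lw, comb, chk, true)
    else (st.1, st.2.1, chk, st.2.2.2)

def get_guess_maximize_worst_case (combinations : List (List Int)) (constraints : List (Int × Int)) (possible : List (List Int)) (symmetry : List (String × List (Int × Int))) : List Int :=
  if combinations.length == possible.length then [0, 0, 1, 1]
  else
    (combinations.foldl (pvStepA constraints possible symmetry)
      (some 0, [-1, -1, -1, -1], PySem.Set.empty, false)).2.1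

-- ===== PORT B =====
-- _feedback(p, comb) of Source B: (reds, whites) in one shot
def pvFeedback (p comb : List Int) : Int × Int :=
  let reds := ((p.zip comb).countP (fun ab => ab.1 == ab.2) : Int)
  let total := ((PySem.List.pyRange 0 6 1).map
    (fun c => min (PySem.List.count p c : Int) (PySem.List.count comb c : Int))).sum
  (reds, total - reds)

-- _hash(comb, symmetry) of Source B (setdefault form)
def pvHashB (comb : List Int) (symmetry : List (String × List (Int × Int))) : List Int :=
  let struct := comb.foldl
    (fun d x => PySem.Dict.setdefault d x (PySem.Dict.size d : Int)) PySem.Dict.empty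
  comb.map (fun x => PySem.Dict.getD (PySem.Dict.mk (PySem.Dict.getD (PySem.Dict.mk symmetry) "map" [])) x 0)
    ++ comb.map (fun x => PySem.Dict.getD struct x 0)

def pvStepB (constraints : List (Int × Int)) (possible : List (List Int))
    (symmetry : List (String × List (Int × Int)))
    (st : Option Int × List Int × PySem.Set (List Int) × Bool) (comb : List Int) :
    Option Int × List Int × PySem.Set (List Int) × Bool :=
  let h := pvHashB comb symmetry
  if PySem.Set.contains st.2.2.1 h then st
  else
    let chk := PySem.Set.add st.2.2.1 h
    let hist := possible.foldl (fun d p =>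
        let fb := pvFeedback p comb
        PySem.Dict.insert d fb (PySem.Dict.getD d fb 0 + 1)) PySem.Dict.empty
    let lw : Option Int :=
      if constraints.isEmpty then none
      else some ((possible.length : Int) -
        constraints.foldl (fun m c => max m (PySem.Dict.getD hist c 0)) 0)
    if pvGtInf lw st.1 then (lw, comb, chk, decide (comb ∈ possible))
    else if !st.2.2.2 && lw == st.1 && decide (comb ∈ possible) then (lw, comb, chk, true)
    else (st.1, st.2.1, chk, st.2.2.2)

def get_guess_maximize_worst_case_alt (combinations : List (List Int)) (constraints : List (Int × Int)) (possible : List (List Int)) (symmetry : List (String × List (Int × Int))) : List Int :=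
  if combinations.length == possible.length then [0, 0, 1, 1]
  else
    (combinations.foldl (pvStepB constraints possible symmetry)
      (some 0, [-1, -1, -1, -1], PySem.Set.empty, false)).2.1

-- ===== PRECONDITION & SPEC =====
-- Pre_ restricts to the game's natural domain: every pin of combinations/possible is a color
-- 0..5 and symmetry's "map" covers every pin of combinations (unless the early return fires).
-- Outside it A can raise IndexError (semi_equal_pins) or KeyError (get_hash); it also excludes
-- a few inputs on which A happens to return — negative pins that wrap around in A's count
-- arrays, or out-of-range pins on which the short-circuit in is_possible skips the raising
-- call — see the cites in the claim.
def Pre_get_guess_maximize_worst_case (combinations : List (List Int)) (constraints : List (Int × Int)) (possible : List (List Int)) (symmetry : List (String × List (Int × Int))) : Prop :=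
  combinations.length = possible.length ∨
  ((∀ c ∈ combinations, ∀ x ∈ c, 0 ≤ x ∧ x < 6) ∧
   (∀ p ∈ possible, ∀ x ∈ p, 0 ≤ x ∧ x < 6) ∧
   (∀ c ∈ combinations, (PySem.Dict.get? (PySem.Dict.mk symmetry) "map").isSome ∧
      ∀ x ∈ c, (PySem.Dict.get? (PySem.Dict.mk ((PySem.Dict.get? (PySem.Dict.mk symmetry) "map").getD [])) x).isSome))
instance (combinations : List (List Int)) (constraints : List (Int × Int)) (possible : List (List Int)) (symmetry : List (String × List (Int × Int))) : Decidable (Pre_get_guess_maximize_worst_case combinations constraints possible symmetry) := by unfold Pre_get_guess_maximize_worst_case; infer_instance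

def pvWitness_get_guess_maximize_worst_case : List (List Int) × (List (Int × Int)) × List (List Int) × (List (String × List (Int × Int))) :=
  ([[0, 1], [1, 1]], [(1, 0), (0, 1)], [[0, 1]], [("map", [(0, 0), (1, 1)])])

def Spec_get_guess_maximize_worst_case (combinations : List (List Int)) (constraints : List (Int × Int)) (possible : List (List Int)) (symmetry : List (String × List (Int × Int))) (out : List Int) : Prop := out = get_guess_maximize_worst_case_alt combinations constraints possible symmetry
instance (combinations : List (List Int)) (constraints : List (Int × Int)) (possible : List (List Int)) (symmetry : List (String × List (Int × Int))) (out : List Int) : Decidable (Spec_get_guess_maximize_worst_case combinations constraints possible symmetry out) := by unfold Spec_get_guess_maximize_worst_case; infer_instance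

-- ===== CLAIM (what is proved, stated in full; the proofs are below) =====
def Claim_equal_get_guess_maximize_worst_case : Prop := ∀ (combinations : List (List Int)) (constraints : List (Int × Int)) (possible : List (List Int)) (symmetry : List (String × List (Int × Int))), Dom_get_guess_maximize_worst_case combinations constraints possible symmetry → Pre_get_guess_maximize_worst_case combinations constraints possible symmetry → Spec_get_guess_maximize_worst_case combinations constraints possible symmetry (get_guess_maximize_worst_case combinations constraints possible symmetry)

-- ===== LEMMAS AND PROOFS =====

-- the two hash helpers agree (setdefault vs. explicit membership test)
lemma pvHashB_eq (comb : List Int) (symmetry : List (String × List (Int × Int))) :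
    pvHashB comb symmetry = get_hash comb symmetry := by
  unfold pvHashB get_hash
  have hstep : (fun (d : PySem.Dict Int Int) (x : Int) => PySem.Dict.setdefault d x (PySem.Dict.size d : Int)) =
      (fun (d : PySem.Dict Int Int) (n : Int) =>
        if (PySem.Dict.get? d n).isSome then d else PySem.Dict.insert d n (PySem.Dict.size d : Int)) := by
    funext d x
    by_cases h : d.contains x
    · rw [PySem.Dict.setdefault_of_contains _ _ h]
      rw [PySem.Dict.contains_eq_isSome_get?] at h
      simp [h]
    · rw [PySem.Dict.setdefault_of_not_contains _ _ (by simpa using h)]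
      rw [PySem.Dict.contains_eq_isSome_get?] at h
      simp at h
      simp [h]
  rw [hstep]

-- A's count array holds the pin counts (pins in range, 6-element accumulator)
lemma replicate6_getD (i : Nat) : ([0, 0, 0, 0, 0, 0] : List Int)[i]?.getD 0 = 0 := by
  match i with
  | 0 | 1 | 2 | 3 | 4 | 5 => rfl
  | n + 6 => rfl

lemma pvBump_counts (l : List Int) (hl : ∀ x ∈ l, 0 ≤ x ∧ x < 6) (acc : List Int)
    (hacc : acc.length = 6) :
    l.foldl pvBump acc = (List.range 6).map (fun i => acc.getD i 0 + (l.count (i : Int) : Int)) := by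
  induction l generalizing acc with
  | nil =>
    simp only [List.foldl_nil, List.count_nil]
    apply List.ext_getElem
    · simp [hacc]
    · intro i hi hi'
      simp at hi'
      simp only [List.getElem_map, List.getElem_range, Nat.cast_zero, add_zero]
      rw [List.getD_eq_getElem _ _ (by omega : i < acc.length)]
  | cons a t ih =>
    obtain ⟨ha0, ha6⟩ := hl a (by simp)
    have hlen : (pvBump acc a).length = 6 := by
      simp [pvBump, PySem.List.length_pySetD, hacc]
    rw [List.foldl_cons, ih (fun x hx => hl x (by simp [hx])) _ hlen]
    apply List.ext_getElem
    · simp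
    · intro i hi hi'
      simp only [List.length_map, List.length_range] at hi
      simp only [List.getElem_map, List.getElem_range]
      have hbump : pvBump acc a = acc.set a.toNat (acc[a.toNat]'(by omega) + 1) := by
        rw [pvBump, PySem.List.pySetD_of_nonneg _ _ ha0,
          PySem.List.pyGetD_eq_getElem _ _ ha0 (by rw [hacc]; omega)]
      rw [hbump]
      have hset : (acc.set a.toNat (acc[a.toNat]'(by omega) + 1)).getD i 0 =
          if a.toNat = i then acc[a.toNat]'(by omega) + 1 else acc.getD i 0 := by
        rw [List.getD_eq_getElem _ _ (by simp [hacc]; omega), List.getElem_set]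
        split
        · rfl
        · rw [List.getD_eq_getElem _ _ (by omega)]
      rw [hset]
      have hcnt : ((a :: t).count (i : Int)) = (t.count (i : Int)) + (if a = (i : Int) then 1 else 0) := by
        by_cases h : a = (i : Int)
        · simp [h]
        · rw [List.count_cons]
          simp [h]
      rw [hcnt]
      by_cases he : a.toNat = i
      · subst he
        have h2 : a = (a.toNat : Int) := by omega
        rw [if_pos rfl, if_pos h2, List.getD_eq_getElem _ _ (by omega)]
        push_cast
        ring
      · have h2 : ¬ (a = (i : Int)) := by omega
        rw [if_neg he, if_neg h2]
        push_cast
        ring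

-- semi_equal_pins is the min-of-counts sum B computes
lemma semi_eq (p comb : List Int) (hp : ∀ x ∈ p, 0 ≤ x ∧ x < 6) (hc : ∀ x ∈ comb, 0 ≤ x ∧ x < 6) :
    semi_equal_pins p comb =
      ((PySem.List.pyRange 0 6 1).map
        (fun c => min (PySem.List.count p c : Int) (PySem.List.count comb c : Int))).sum := by
  simp only [semi_equal_pins]
  rw [pvBump_counts p hp _ (by simp), pvBump_counts comb hc _ (by simp), List.zip_map',
    PySem.List.pyRange_zero]
  simp only [List.map_map]
  congr 1
  apply List.map_congr_left
  intro i _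
  simp [PySem.List.count, List.getD, replicate6_getD]

-- A's constraint test is equality of B's feedback with the constraint
lemma is_possible_eq (p comb : List Int) (cst : Int × Int)
    (hp : ∀ x ∈ p, 0 ≤ x ∧ x < 6) (hc : ∀ x ∈ comb, 0 ≤ x ∧ x < 6) :
    is_possible p comb cst = (pvFeedback p comb == cst) := by
  simp only [is_possible, pvFeedback, equal_pins, semi_eq p comb hp hc, List.countP_eq_length_filter]
  rfl

-- A's exclusion count is |possible| minus the matched-feedback count
lemma excludes_eq (comb : List Int) (cst : Int × Int) (possible : List (List Int))
    (hposs : ∀ q ∈ possible, ∀ x ∈ q, 0 ≤ x ∧ x < 6) (hc : ∀ x ∈ comb, 0 ≤ x ∧ x < 6) :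
    excludes comb cst possible =
      (possible.length : Int) - (possible.countP (fun q => pvFeedback q comb == cst) : Int) := by
  unfold excludes
  rw [PySem.List.foldl_if_add_one (fun q => !is_possible q comb cst) possible 0]
  have hcong : List.countP (fun q => !is_possible q comb cst) possible
      = List.countP (fun q => !(pvFeedback q comb == cst)) possible := by
    apply List.countP_congr
    intro q hq
    rw [is_possible_eq q comb cst (hposs q hq) hc]
  rw [hcong]
  have := List.length_eq_countP_add_countP (fun q => pvFeedback q comb == cst) (l := possible)
  have h2 : List.countP (fun q => decide ¬(pvFeedback q comb == cst) = true) possible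
      = List.countP (fun q => !(pvFeedback q comb == cst)) possible := by
    apply List.countP_congr; intro q _; simp
  omega

-- B's histogram lookup is the matched-feedback count
lemma hist_getD (possible : List (List Int)) (comb : List Int) (cst : Int × Int) :
    PySem.Dict.getD (possible.foldl (fun d p =>
        let fb := pvFeedback p comb
        PySem.Dict.insert d fb (PySem.Dict.getD d fb 0 + 1)) PySem.Dict.empty) cst 0 =
      (possible.countP (fun p => pvFeedback p comb == cst) : Int) := by
  change (List.foldl (fun d p => PySem.Dict.insert d (pvFeedback p comb)
      (PySem.Dict.getD d (pvFeedback p comb) 0 + 1)) PySem.Dict.empty possible).getD cst 0 = _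
  rw [← List.foldl_map (f := fun p => pvFeedback p comb)
    (g := fun d x => PySem.Dict.insert d x (PySem.Dict.getD d x 0 + 1))]
  rw [PySem.Dict.getD_foldl_insert_add_one]
  rw [List.count_eq_countP, List.countP_map]
  simp [PySem.Dict.getD_empty]
  rfl

-- running min of (n - f c) over a nonempty list = n - running max of f c
lemma pvMinMax (n : Int) (f : Int × Int → Int) (hf : ∀ c, 0 ≤ f c) (cs : List (Int × Int)) :
    cs.foldl (fun lw cst => if pvLtInf (n - f cst) lw then some (n - f cst) else lw) none =
      if cs.isEmpty then none else some (n - cs.foldl (fun m c => max m (f c)) 0) := by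
  have core : ∀ (t : List (Int × Int)) (m : Int),
      t.foldl (fun lw cst => if pvLtInf (n - f cst) lw then some (n - f cst) else lw) (some (n - m)) =
        some (n - t.foldl (fun m c => max m (f c)) m) := by
    intro t
    induction t with
    | nil => intro m; simp
    | cons c t ih =>
      intro m
      simp only [List.foldl_cons]
      by_cases h : m < f c
      · rw [if_pos (by simp [pvLtInf]; omega), show n - f c = n - max m (f c) by omega] 
        exact ih (max m (f c))
      · rw [if_neg (by simp [pvLtInf]; omega), show (some (n - m)) = some (n - max m (f c)) by
          rw [max_eq_left (by omega)]]
        exact ih (max m (f c))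
  cases cs with
  | nil => simp
  | cons c t =>
    simp only [List.foldl_cons, List.isEmpty_cons]
    rw [if_pos (by simp [pvLtInf]), show n - f c = n - max 0 (f c) by
      rw [max_eq_right (hf c)]]
    rw [core t (max 0 (f c))]
    simp

lemma pvStep_eq (constraints : List (Int × Int)) (possible : List (List Int))
    (symmetry : List (String × List (Int × Int))) (comb : List Int)
    (hc : ∀ x ∈ comb, 0 ≤ x ∧ x < 6) (hposs : ∀ p ∈ possible, ∀ x ∈ p, 0 ≤ x ∧ x < 6)
    (st : Option Int × List Int × PySem.Set (List Int) × Bool) :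
    pvStepA constraints possible symmetry st comb = pvStepB constraints possible symmetry st comb := by
  unfold pvStepA pvStepB
  rw [pvHashB_eq]
  by_cases hmem : PySem.Set.contains st.2.2.1 (get_hash comb symmetry)
  · simp only [if_pos hmem]
  · simp only [hmem, Bool.false_eq_true, if_false]
    have hexc : (fun (lw : Option Int) (cst : Int × Int) =>
        let exc := excludes comb cst possible
        if pvLtInf exc lw then some exc else lw) =
        (fun (lw : Option Int) (cst : Int × Int) =>
          if pvLtInf ((possible.length : Int) -
              ((possible.countP (fun q => pvFeedback q comb == cst)) : Int)) lw
          then some ((possible.length : Int) -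
              ((possible.countP (fun q => pvFeedback q comb == cst)) : Int)) else lw) := by
      funext lw cst
      simp only [excludes_eq comb cst possible hposs hc]
    have hmax : (fun (m : Int) (c : Int × Int) =>
        max m (PySem.Dict.getD (possible.foldl (fun d p =>
          let fb := pvFeedback p comb
          PySem.Dict.insert d fb (PySem.Dict.getD d fb 0 + 1)) PySem.Dict.empty) c 0)) =
        (fun (m : Int) (c : Int × Int) =>
          max m ((possible.countP (fun q => pvFeedback q comb == c) : Int))) := by
      funext m c
      rw [hist_getD]
    rw [hexc, hmax,
      pvMinMax (possible.length : Int)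
        (fun cst => ((possible.countP (fun q => pvFeedback q comb == cst)) : Int))
        (fun c => Int.natCast_nonneg _) constraints]

-- ===== VERDICT (by name: the statement is the Claim_ definition above) =====
theorem get_guess_maximize_worst_case_spec : Claim_equal_get_guess_maximize_worst_case := by
  intro combinations constraints possible symmetry _hdom hpre
  unfold Spec_get_guess_maximize_worst_case get_guess_maximize_worst_case get_guess_maximize_worst_case_alt
  by_cases hlen : combinations.length = possible.length
  · simp [hlen]
  · simp only [beq_iff_eq, hlen, if_false]
    rcases hpre with h | ⟨hcomb, hposs, _⟩
    · exact absurd h hlen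
    · rw [PySem.List.foldl_congr_mem' _ _ _ _
        (fun comb hmem st => pvStep_eq constraints possible symmetry comb (hcomb comb hmem) hposs st)]
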